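-- pv_equiv track=rewrite | github.com/adambear82/advent-of-code | 2015/day-13/seating-plan.py | build_happiness_map
-- ===== SOURCE A (Python) =====
-- def build_happiness_map(entries):
--     """
--     entries: list of [A, B, delta]
--     Returns:
--       h: dict of dicts {A: {B: delta, ...}, ...} (directed)
--       people: sorted list of unique people
--     """
--     h = {}
--     people = set()
--     for a, b, delta in entries:
--         if a not in h:
--             h[a] = {}
--         h[a][b] = delta
--         people.add(a)
--         people.add(b)
--     return h, sorted(people)
-- ===== SOURCE B (Python) =====
-- def build_happiness_map(entries):
--     """
--     entries: list of [A, B, delta]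
--     Returns:
--       h: dict of dicts {A: {B: delta, ...}, ...} (directed)
--       people: sorted list of unique people
--     """
--     firsts = list(dict.fromkeys(a for a, b, d in entries))
--     h = {a: {b: d for a2, b, d in entries if a2 == a} for a in firsts}
--     people = sorted({x for a, b, _ in entries for x in (a, b)})
--     return h, people
-- ===== Notes on version B (the rewrite author's own statement) =====
-- stated objective: alternative
-- what changed: Replaces A's single incremental pass (dict-of-dicts mutated with a membership check, plus a running set) by a grouped construction: dedupe the first-column keys once, build each inner dict with one comprehension per key over the entries, and collect people with a set comprehension over all name pairs.
import Mathlib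
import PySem

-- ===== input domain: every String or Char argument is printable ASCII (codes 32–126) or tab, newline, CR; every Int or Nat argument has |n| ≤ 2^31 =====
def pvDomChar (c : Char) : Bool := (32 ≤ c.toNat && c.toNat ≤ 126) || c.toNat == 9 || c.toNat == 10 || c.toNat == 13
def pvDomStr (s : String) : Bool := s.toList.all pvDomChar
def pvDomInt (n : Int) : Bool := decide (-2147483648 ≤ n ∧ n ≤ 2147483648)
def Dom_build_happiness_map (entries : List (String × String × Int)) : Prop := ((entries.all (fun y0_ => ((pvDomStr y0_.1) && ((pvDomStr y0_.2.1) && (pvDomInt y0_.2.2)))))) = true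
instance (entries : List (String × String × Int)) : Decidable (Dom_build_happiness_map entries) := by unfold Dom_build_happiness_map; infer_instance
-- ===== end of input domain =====

-- B builds the same map by a grouped construction (dedup of the first-column keys, one filtered inner
-- pass per key, set comprehension over all name pairs) instead of A's single incremental
-- membership-checked pass; objective: alternative decomposition (no speed claim).

-- ===== PORT A =====
def build_happiness_map (entries : List (String × String × Int)) : (List (String × List (String × Int))) × List String :=
  let st := entries.foldl
    (fun (st : PySem.Dict String (PySem.Dict String Int) × PySem.Set String) e =>
      let h := st.1
      let h := if h.contains e.1 then h else h.insert e.1 PySem.Dict.empty   -- if a not in h: h[a] = {}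
      let h := h.insert e.1 ((h.getD e.1 PySem.Dict.empty).insert e.2.1 e.2.2)  -- h[a][b] = delta (read inner, update, store back)
      let people := PySem.Set.add (PySem.Set.add st.2 e.1) e.2.1
      (h, people))
    (PySem.Dict.empty, PySem.Set.empty)
  (st.1.items.map (fun p => (p.1, p.2.items)), PySem.List.sorted st.2 (fun x => x) false)

-- ===== PORT B =====
-- inner dict comprehension {b: d for a2, b, d in entries if a2 == a}
def bhAltInner (entries : List (String × String × Int)) (a : String) : PySem.Dict String Int :=
  (entries.filter (fun e => e.1 == a)).foldl (fun d e => d.insert e.2.1 e.2.2) PySem.Dict.empty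

def build_happiness_map_alt (entries : List (String × String × Int)) : (List (String × List (String × Int))) × List String :=
  let firsts := PySem.List.dedup (entries.map (fun e => e.1))   -- list(dict.fromkeys(...))
  let h := firsts.map (fun a => (a, (bhAltInner entries a).items))
  let people := PySem.List.sorted (PySem.Set.ofList (entries.flatMap (fun e => [e.1, e.2.1]))) (fun x => x) false
  (h, people)

-- ===== PRECONDITION & SPEC =====
def Spec_build_happiness_map (entries : List (String × String × Int)) (out : (List (String × List (String × Int))) × List String) : Prop := out = build_happiness_map_alt entries
instance (entries : List (String × String × Int)) (out : (List (String × List (String × Int))) × List String) : Decidable (Spec_build_happiness_map entries out) := by unfold Spec_build_happiness_map; infer_instance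

-- ===== CLAIM (what is proved, stated in full; the proofs are below) =====
def Claim_equal_build_happiness_map : Prop := ∀ (entries : List (String × String × Int)), Dom_build_happiness_map entries → Spec_build_happiness_map entries (build_happiness_map entries)

-- ===== LEMMAS AND PROOFS =====

def stepH (h : PySem.Dict String (PySem.Dict String Int)) (e : String × String × Int) : PySem.Dict String (PySem.Dict String Int) :=
  let h1 := if h.contains e.1 then h else h.insert e.1 PySem.Dict.empty
  h1.insert e.1 ((h1.getD e.1 PySem.Dict.empty).insert e.2.1 e.2.2)

def innerG (d : PySem.Dict String Int) (l : List (String × String × Int)) : PySem.Dict String Int :=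
  l.foldl (fun d e => d.insert e.2.1 e.2.2) d

lemma update_eq_append (l : List String) (s : PySem.Set String) :
    PySem.Set.update s l = s ++ PySem.Set.ofList (l.filter (fun x => !(PySem.Set.contains s x))) := by
  match l with
  | [] => simp [PySem.Set.update, PySem.Set.ofList]
  | x :: l =>
    have hstep : PySem.Set.update s (x :: l) = PySem.Set.update (PySem.Set.add s x) l := by
      simp [PySem.Set.update]
    by_cases hx : x ∈ s
    · have hadd : PySem.Set.add s x = s := by simp [PySem.Set.add, PySem.Set.contains, hx]
      have hfil : (x :: l).filter (fun y => !(PySem.Set.contains s y)) = l.filter (fun y => !(PySem.Set.contains s y)) := by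
        simp [List.filter_cons, PySem.Set.contains, hx]
      rw [hstep, hadd, hfil, update_eq_append l s]
    · have hadd : PySem.Set.add s x = s ++ [x] := by simp [PySem.Set.add, PySem.Set.contains, hx]
      have hfil : (x :: l).filter (fun y => !(PySem.Set.contains s y)) = x :: l.filter (fun y => !(PySem.Set.contains s y)) := by
        simp [List.filter_cons, PySem.Set.contains, hx]
      rw [hstep, hadd, hfil, update_eq_append l (s ++ [x])]
      have h1 : PySem.Set.ofList (x :: l.filter (fun y => !(PySem.Set.contains s y)))
          = PySem.Set.update [x] (l.filter (fun y => !(PySem.Set.contains s y))) := by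
        simp [PySem.Set.ofList_eq_foldl, PySem.Set.update, PySem.Set.add, PySem.Set.contains]
      rw [h1, update_eq_append (l.filter (fun y => !(PySem.Set.contains s y))) [x], List.filter_filter]
      have hpred : ∀ y ∈ l, (!(PySem.Set.contains [x] y) && !(PySem.Set.contains s y)) = (!(PySem.Set.contains (s ++ [x]) y)) := by
        intro y _
        by_cases h1 : y ∈ s <;> by_cases h2 : y = x <;> simp [PySem.Set.contains, h1, h2]
      rw [List.filter_congr hpred]
      simp
termination_by l.length
decreasing_by
  · simp
  · simp
  · have h2 := List.length_filter_le (fun y => !(PySem.Set.contains s y)) l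
    simp [PySem.Set.contains] at h2 ⊢
    omega

lemma dedup_cons (a : String) (l : List String) :
    PySem.List.dedup (a :: l) = a :: PySem.List.dedup (l.filter (fun x => !(x == a))) := by
  have h1 : PySem.List.dedup (a :: l) = PySem.Set.update [a] l := by
    simp [PySem.Set.ofList_eq_foldl, PySem.Set.update, PySem.Set.add, PySem.Set.contains]
  rw [h1, update_eq_append]
  have hpred : ∀ y ∈ l, (!(PySem.Set.contains [a] y)) = (!(y == a)) := by
    intro y _; by_cases h : y = a <;> simp [PySem.Set.contains, h]
  rw [List.filter_congr hpred]
  simp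

lemma people_eq (entries : List (String × String × Int)) : ∀ (s : PySem.Set String),
    entries.foldl (fun s e => PySem.Set.add (PySem.Set.add s e.1) e.2.1) s
      = PySem.Set.update s (entries.flatMap (fun e => [e.1, e.2.1])) := by
  induction entries with
  | nil => intro s; simp [PySem.Set.update]
  | cons e t ih => intro s; simp only [List.foldl_cons, List.flatMap_cons, ih, PySem.Set.update, List.foldl_cons, List.foldl_append, List.cons_append, List.nil_append]

lemma innerG_cons (d : PySem.Dict String Int) (e : String × String × Int) (l : List (String × String × Int)) :
    innerG d (e :: l) = innerG (d.insert e.2.1 e.2.2) l := rfl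

lemma nodup_step (h : PySem.Dict String (PySem.Dict String Int)) (e : String × String × Int)
    (hn : h.keys.Nodup) : (stepH h e).keys.Nodup := by
  unfold stepH
  by_cases hc : h.contains e.1 = true <;> simp [hc] <;>
    exact PySem.Dict.nodup_keys_insert _ _ _ (by first | exact hn | exact PySem.Dict.nodup_keys_insert _ _ _ hn)

lemma grouping : ∀ (entries : List (String × String × Int)) (h : PySem.Dict String (PySem.Dict String Int)),
    h.keys.Nodup →
    (entries.foldl stepH h).items =
      h.items.map (fun p => (p.1, innerG p.2 (entries.filter (fun e => e.1 == p.1))))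
      ++ (PySem.List.dedup ((entries.map (fun e => e.1)).filter (fun a => !h.contains a))).map
           (fun a => (a, innerG PySem.Dict.empty (entries.filter (fun e => e.1 == a)))) := by
  intro entries
  induction entries with
  | nil =>
    intro h hn
    simp [innerG]
  | cons e t ih =>
    intro h hn
    rw [List.foldl_cons, ih (stepH h e) (nodup_step h e hn)]
    by_cases hc : h.contains e.1 = true
    · -- existing key: stepH h e = h.insert e.1 ((h.getD e.1 ∅).insert b δ), items updated in place
      have hstep : stepH h e = h.insert e.1 ((h.getD e.1 PySem.Dict.empty).insert e.2.1 e.2.2) := by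
        simp [stepH, hc]
      have hitems : (stepH h e).items
          = h.items.map (fun p => if p.1 == e.1 then (e.1, (h.getD e.1 PySem.Dict.empty).insert e.2.1 e.2.2) else p) := by
        rw [hstep]; exact PySem.Dict.items_insert_of_contains _ _ hc
      have hcont : ∀ x, (stepH h e).contains x = h.contains x := by
        intro x
        rw [hstep, PySem.Dict.contains_insert]
        by_cases hx : x = e.1 <;> simp [hx, hc]
      -- second summand: predicates agree and head of the filter is dropped
      have hfilterkeys : ((e :: t).map (fun e => e.1)).filter (fun a => !h.contains a)
          = (t.map (fun e => e.1)).filter (fun a => !h.contains a) := by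
        simp [hc]
      have hsnd : ((t.map (fun e => e.1)).filter (fun a => !(stepH h e).contains a))
          = ((t.map (fun e => e.1)).filter (fun a => !h.contains a)) := by
        apply List.filter_congr; intro a _; rw [hcont]
      rw [hitems, hsnd, hfilterkeys, List.map_map]
      congr 1
      · -- first summand
        apply List.map_congr_left
        intro p hp
        by_cases hpe : p.1 = e.1
        · have hget : h.getD e.1 PySem.Dict.empty = p.2 := by
            rw [← hpe]
            exact PySem.Dict.getD_of_mem_items _ (by simpa using hp) hn PySem.Dict.empty
          simp [Function.comp, hpe, hget, List.filter_cons, innerG_cons]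
        · simp [Function.comp, hpe, List.filter_cons, Ne.symm hpe]
      · -- second summand: inner folds agree since a ≠ e.1 for surviving keys? no: filter over (e::t)
        apply List.map_congr_left
        intro a ha
        have hane : ¬ (e.1 = a) := by
          intro hEq
          have : a ∈ (t.map (fun e => e.1)).filter (fun a => !h.contains a) := by
            rw [← PySem.List.mem_dedup]; exact ha
          have := (List.mem_filter.mp this).2
          rw [← hEq] at this; simp [hc] at this
        simp [List.filter_cons, hane]
    · -- new key: stepH h e = h.insert e.1 (∅.insert b δ), items appended
      have hc' : h.contains e.1 = false := by simpa using hc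
      have hstep : stepH h e = h.insert e.1 (PySem.Dict.empty.insert e.2.1 e.2.2) := by
        simp [stepH, hc', PySem.Dict.getD_insert_self, PySem.Dict.insert_insert_self]
      have hitems : (stepH h e).items = h.items ++ [(e.1, PySem.Dict.empty.insert e.2.1 e.2.2)] := by
        rw [hstep]; exact PySem.Dict.items_insert_of_not_contains _ _ hc'
      have hcont : ∀ x, (stepH h e).contains x = ((x == e.1) || h.contains x) := by
        intro x; rw [hstep, PySem.Dict.contains_insert]
      -- RHS second summand: peel the head key with dedup_cons
      have hkeys : ((e :: t).map (fun e => e.1)).filter (fun a => !h.contains a)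
          = e.1 :: (t.map (fun e => e.1)).filter (fun a => !h.contains a) := by
        simp [hc']
      rw [hitems, hkeys, dedup_cons, List.filter_filter]
      have hsnd : ((t.map (fun e => e.1)).filter (fun a => !(stepH h e).contains a))
          = ((t.map (fun e => e.1)).filter (fun a => !(a == e.1) && !h.contains a)) := by
        apply List.filter_congr; intro a _; rw [hcont]; simp [Bool.not_or]
      rw [hsnd, List.map_append, List.map_cons]
      have hpe : ∀ p, p ∈ h.items → ¬ (p.1 = e.1) := by
        intro p hp hEq
        have : p.1 ∈ h.keys := PySem.Dict.mem_keys_of_mem_items _ hp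
        rw [hEq] at this
        rw [← PySem.Dict.contains_iff_mem_keys] at this
        simp [hc'] at this
      have hfirst : h.items.map (fun p => (p.1, innerG p.2 (t.filter (fun e' => e'.1 == p.1))))
          = h.items.map (fun p => (p.1, innerG p.2 ((e :: t).filter (fun e' => e'.1 == p.1)))) := by
        apply List.map_congr_left
        intro p hp
        have hne : ¬ e.1 = p.1 := fun hEq => hpe p hp hEq.symm
        simp [List.filter_cons, hne]
      have hhead : (e.1, innerG (PySem.Dict.empty.insert e.2.1 e.2.2) (t.filter (fun e' => e'.1 == e.1)))
          = (e.1, innerG PySem.Dict.empty ((e :: t).filter (fun e' => e'.1 == e.1))) := by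
        simp [List.filter_cons, innerG_cons]
      have htail : ((PySem.List.dedup ((t.map (fun e => e.1)).filter (fun a => !(a == e.1) && !h.contains a))).map
            (fun a => (a, innerG PySem.Dict.empty (t.filter (fun e' => e'.1 == a)))))
          = ((PySem.List.dedup ((t.map (fun e => e.1)).filter (fun a => !(a == e.1) && !h.contains a))).map
            (fun a => (a, innerG PySem.Dict.empty ((e :: t).filter (fun e' => e'.1 == a))))) := by
        apply List.map_congr_left
        intro a ha
        have : ¬ (e.1 = a) := by
          intro hEq
          have hmem : a ∈ (t.map (fun e => e.1)).filter (fun a => !(a == e.1) && !h.contains a) := by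
            rw [← PySem.List.mem_dedup]; exact ha
          have := (List.mem_filter.mp hmem).2
          rw [← hEq] at this; simp at this
        simp [List.filter_cons, this]
      rw [hfirst, hhead, htail]
      simp

lemma pair_fold (entries : List (String × String × Int)) : ∀ (d : PySem.Dict String (PySem.Dict String Int)) (s : PySem.Set String),
    entries.foldl
      (fun (st : PySem.Dict String (PySem.Dict String Int) × PySem.Set String) e =>
        let h := st.1
        let h := if h.contains e.1 then h else h.insert e.1 PySem.Dict.empty
        let h := h.insert e.1 ((h.getD e.1 PySem.Dict.empty).insert e.2.1 e.2.2)
        let people := PySem.Set.add (PySem.Set.add st.2 e.1) e.2.1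
        (h, people)) (d, s)
      = (entries.foldl stepH d, entries.foldl (fun s e => PySem.Set.add (PySem.Set.add s e.1) e.2.1) s) := by
  induction entries with
  | nil => intro d s; rfl
  | cons e t ih => intro d s; simp only [List.foldl_cons, ih]; rfl


-- ===== VERDICT (by name: the statement is the Claim_ definition above) =====
theorem build_happiness_map_spec : Claim_equal_build_happiness_map := by
  intro entries _
  unfold Spec_build_happiness_map
  unfold build_happiness_map build_happiness_map_alt
  rw [pair_fold]
  simp only
  rw [Prod.mk.injEq]
  refine ⟨?_, ?_⟩
  · rw [grouping entries PySem.Dict.empty (by simp)]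
    simp [PySem.Dict.empty, Function.comp, bhAltInner, innerG]
  · rw [people_eq]
    rfl
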